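-- pv_equiv track=rewrite | github.com/zelane/advent-of-code | 2018/7/main.py | process
-- ===== SOURCE A (Python) =====
-- def process(steps, workers, time):
--     result = ""
--     jobs = set()
--     ttime = 0
--     parts = {s[0] for s in steps}.union({s[1] for s in steps})
--     while True:
--         new_jobs = set()
--         doing = set()
--         for job, t in [x for x in jobs]:
--             if t > 0:
--                 new_jobs.add((job, t-1))
--                 doing.add(job)
--             else:
--                 parts.remove(job)
--                 result += job
--
--         if len(parts) == 0:
--             return ttime, result
--
--         jobs = new_jobs
--
--         pre_reqs = {step[1] for step in steps if step[0] not in result}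
--         to_do = sorted({p for p in parts if p not in pre_reqs and p not in doing})
--         while len(jobs) < workers:
--             if not to_do: break
--             do = to_do.pop(0)
--             jobs.add((do, (time + ord(do) - 65)))
--         ttime += 1
-- ===== SOURCE B (Python) =====
-- # Same tick clock, but the dependency graph is built ONCE into predecessor /
-- # successor maps and the sorted ready pool is maintained incrementally (insort
-- # on job completion), so the per-tick rescan of all edges and the per-tick
-- # sort of A disappear.
--
-- def _insort(xs, x):
--     i = 0
--     while i < len(xs) and xs[i] < x:
--         i += 1
--     xs.insert(i, x)
--
-- def process(steps, workers, time):
--     preds = {}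
--     succs = {}
--     for s in steps:
--         u, v = s[0], s[1]
--         for p in (u, v):
--             if p not in preds:
--                 preds[p] = set()
--                 succs[p] = set()
--         preds[v].add(u)
--         succs[u].add(v)
--     ready = sorted(p for p in preds if not preds[p])
--     remaining = len(preds)
--     running = []
--     done = []
--     clock = 0
--     while remaining:
--         expired = [c for c, t in running if t <= 0]
--         running = [(c, t - 1) for c, t in running if t > 0]
--         for c in expired:
--             done.append(c)
--             remaining -= 1
--             for d in sorted(succs[c]):
--                 preds[d].discard(c)
--                 if not preds[d]:
--                     _insort(ready, d)
--         if remaining == 0: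
--             break
--         while ready and len(running) < workers:
--             c = ready.pop(0)
--             running.append((c, time + ord(c) - 65))
--         clock += 1
--     return clock, "".join(done)
-- ===== Notes on version B (the rewrite author's own statement) =====
-- stated objective: faster
-- what changed: A rescans every edge and re-sorts the candidate pool on every simulated tick; B builds predecessor/successor maps once, keeps a counter of unfinished letters and maintains the sorted ready pool incrementally (insort on completion), so each tick only touches the running jobs.
-- outside the precondition, e.g. on process(['A'], 1, 0): A raises IndexError, B raises IndexError
import Mathlib
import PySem

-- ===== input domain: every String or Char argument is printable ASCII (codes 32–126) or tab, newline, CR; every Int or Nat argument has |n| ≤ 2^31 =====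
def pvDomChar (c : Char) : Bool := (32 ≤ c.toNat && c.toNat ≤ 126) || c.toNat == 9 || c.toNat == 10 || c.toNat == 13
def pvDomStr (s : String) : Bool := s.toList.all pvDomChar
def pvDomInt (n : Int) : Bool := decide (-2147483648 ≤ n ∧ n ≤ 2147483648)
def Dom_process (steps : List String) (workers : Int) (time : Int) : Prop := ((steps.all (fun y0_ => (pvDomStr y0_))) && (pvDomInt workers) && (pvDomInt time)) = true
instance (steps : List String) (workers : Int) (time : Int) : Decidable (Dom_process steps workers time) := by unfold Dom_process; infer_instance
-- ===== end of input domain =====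

-- B keeps A's tick clock but builds the dependency graph ONCE (predecessor /
-- successor maps) and maintains the sorted ready pool incrementally, so A's
-- per-tick rescan of every edge and per-tick sort disappear.

-- ===== PORT A =====

-- first two characters of every step string; none = IndexError in Python's
-- first set comprehension (excluded by Pre_)
def pvEdges? (steps : List String) : Option (List (Char × Char)) :=
  steps.mapM (fun s => do
    let a ← PySem.Str.pyGet? s 0
    let b ← PySem.Str.pyGet? s 1
    pure (a, b))

-- the for-loop over jobs: builds new_jobs and doing, removes finished letters
-- from parts and appends them to result.  `parts.remove(job)` is ported as
-- Set.discard: the removed job is always a member (it was scheduled from parts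
-- and is removed exactly once), so remove never raises and equals discard.
def pvTickFold (jobs : PySem.Set (Char × Int)) (parts : PySem.Set Char) (result : List Char) :
    PySem.Set (Char × Int) × PySem.Set Char × PySem.Set Char × List Char :=
  jobs.foldl (fun st jt =>
    if jt.2 > 0 then
      (PySem.Set.add st.1 (jt.1, jt.2 - 1), PySem.Set.add st.2.1 jt.1, st.2.2.1, st.2.2.2)
    else
      (st.1, st.2.1, PySem.Set.discard st.2.2.1 jt.1, st.2.2.2 ++ [jt.1]))
    (PySem.Set.empty, PySem.Set.empty, parts, result)

-- while len(jobs) < workers: pop the smallest to-do letter, start it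
def pvSchedA (workers time : Int) (jobs : PySem.Set (Char × Int)) : List Char → PySem.Set (Char × Int)
  | [] => jobs
  | d :: rest =>
    if (jobs.length : Int) < workers then
      pvSchedA workers time (PySem.Set.add jobs (d, time + (d.toNat : Int) - 65)) rest
    else jobs

-- the `while True` loop; fuel only makes it total (inside Pre_ it is never exhausted)
def pvLoopA (sps : List (Char × Char)) (workers time : Int) :
    Nat → PySem.Set (Char × Int) → PySem.Set Char → List Char → Int → Int × String
  | 0, _, _, result, ttime => (ttime, String.ofList result)
  | fuel+1, jobs, parts, result, ttime =>
    let st := pvTickFold jobs parts result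
    if st.2.2.1 = [] then (ttime, String.ofList st.2.2.2)
    else
      let preReqs : PySem.Set Char :=
        PySem.Set.ofList ((sps.filter (fun e => !(st.2.2.2.contains e.1))).map (·.2))
      let toDo : List Char :=
        PySem.List.sorted
          (st.2.2.1.filter (fun p => !(PySem.Set.contains preReqs p) && !(PySem.Set.contains st.2.1 p)))
          (fun x => x) false
      pvLoopA sps workers time fuel (pvSchedA workers time st.1 toDo) st.2.2.1 st.2.2.2 (ttime + 1)

-- fuel: one tick per time unit of every job plus one per job plus one; ≥ final ttime + 1 on Pre_
def pvFuelA (parts : List Char) (time : Int) : Nat :=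
  parts.foldl (fun acc c => acc + 1 + (time + (c.toNat : Int) - 65).toNat) 1

def process (steps : List String) (workers : Int) (time : Int) : Int × String :=
  match pvEdges? steps with
  | none => (0, "")  -- Python raises IndexError here (excluded by Pre_)
  | some sps =>
    let parts : PySem.Set Char :=
      PySem.Set.union (PySem.Set.ofList (sps.map (·.1))) (PySem.Set.ofList (sps.map (·.2)))
    pvLoopA sps workers time (pvFuelA parts time) PySem.Set.empty parts [] 0

-- ===== PORT B =====

-- Source B's _insort: linear insertion keeping the ready list sorted
def pvInsort (x : Char) : List Char → List Char
  | [] => [x]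
  | y :: ys => if y < x then y :: pvInsort x ys else x :: y :: ys

-- building the preds / succs dicts from the steps; none = IndexError on a
-- step shorter than two characters (Source B raises there too; excluded by Pre_)
def pvBuildMaps? : List String → PySem.Dict Char (PySem.Set Char) × PySem.Dict Char (PySem.Set Char) → Option (PySem.Dict Char (PySem.Set Char) × PySem.Dict Char (PySem.Set Char))
  | [], st => some st
  | s :: rest, st =>
    match PySem.Str.pyGet? s 0, PySem.Str.pyGet? s 1 with
    | some u, some v =>
      let st := [u, v].foldl (fun st p =>
        if st.1.contains p then st
        else (st.1.insert p PySem.Set.empty, st.2.insert p PySem.Set.empty)) st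
      pvBuildMaps? rest
        (st.1.modify v PySem.Set.empty (fun x => PySem.Set.add x u),
         st.2.modify u PySem.Set.empty (fun x => PySem.Set.add x v))
    | _, _ => none

-- for d in sorted(succs[c]): discard c from preds[d]; newly empty -> insort into ready
def pvUnlockB (c : Char) (succList : List Char)
    (preds : PySem.Dict Char (PySem.Set Char)) (ready : List Char) :
    PySem.Dict Char (PySem.Set Char) × List Char :=
  succList.foldl (fun st d =>
    let pr := st.1.modify d PySem.Set.empty (fun s => PySem.Set.discard s c)
    if pr.getD d PySem.Set.empty = [] then (pr, pvInsort d st.2) else (pr, st.2)) (preds, ready)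

-- for c in expired: append to done, decrement remaining, unlock successors
def pvExpireB (succs : PySem.Dict Char (PySem.Set Char)) (expired : List Char)
    (st : PySem.Dict Char (PySem.Set Char) × List Char × Int × List Char) :
    PySem.Dict Char (PySem.Set Char) × List Char × Int × List Char :=
  expired.foldl (fun st c =>
    let u := pvUnlockB c (PySem.List.sorted (succs.getD c PySem.Set.empty) (fun x => x) false) st.1 st.2.1
    (u.1, u.2, st.2.2.1 - 1, st.2.2.2 ++ [c])) st

-- while ready and len(running) < workers: start the smallest ready letter
def pvSchedBQ (workers time : Int) : List Char → List (Char × Int) → List Char × List (Char × Int)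
  | [], run => ([], run)
  | c :: rest, run =>
    if (run.length : Int) < workers then
      pvSchedBQ workers time rest (run ++ [(c, time + (c.toNat : Int) - 65)])
    else (c :: rest, run)

-- the `while remaining` loop of Source B; fuel only makes it total
def pvLoopB (succs : PySem.Dict Char (PySem.Set Char)) (workers time : Int) :
    Nat → PySem.Dict Char (PySem.Set Char) → List Char → List (Char × Int) → Int → List Char → Int → Int × String
  | 0, _, _, _, _, done, clock => (clock, String.ofList done)
  | fuel+1, preds, ready, running, remaining, done, clock =>
    if remaining = 0 then (clock, String.ofList done)
    else
      let expired := (running.filter (fun p => p.2 ≤ 0)).map (·.1)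
      let running' := (running.filter (fun p => 0 < p.2)).map (fun p => (p.1, p.2 - 1))
      let st := pvExpireB succs expired (preds, ready, remaining, done)
      if st.2.2.1 = 0 then (clock, String.ofList st.2.2.2)
      else
        let sr := pvSchedBQ workers time st.2.1 running'
        pvLoopB succs workers time fuel st.1 sr.1 sr.2 st.2.2.1 st.2.2.2 (clock + 1)

def process_alt (steps : List String) (workers : Int) (time : Int) : Int × String :=
  match pvBuildMaps? steps (PySem.Dict.empty, PySem.Dict.empty) with
  | none => (0, "")  -- Source B raises IndexError here (excluded by Pre_)
  | some maps =>
    let ready := PySem.List.sorted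
      (maps.1.keys.filter (fun p => maps.1.getD p PySem.Set.empty = [])) (fun x => x) false
    pvLoopB maps.2 workers time (pvFuelA maps.1.keys time) maps.1 ready [] (maps.1.size : Int) [] 0

-- ===== PRECONDITION & SPEC =====

-- the first two characters of each step, skipping nothing inside Pre_
def pvEdgesOf (steps : List String) : List (Char × Char) :=
  steps.filterMap (fun s => match s.toList with
    | a :: b :: _ => some (a, b)
    | _ => none)

def pvPartsOf (steps : List String) : PySem.Set Char :=
  PySem.Set.ofList ((pvEdgesOf steps).flatMap (fun e => [e.1, e.2]))

-- Kahn peeling: repeatedly delete every letter all of whose prerequisites are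
-- deleted; the graph is acyclic iff everything gets deleted
def pvPeelStep (edges : List (Char × Char)) (rem : List Char) : List Char :=
  rem.filter (fun v => edges.any (fun e => e.2 == v && rem.contains e.1))

def pvPeel (edges : List (Char × Char)) : Nat → List Char → List Char
  | 0, rem => rem
  | n+1, rem => pvPeel edges n (pvPeelStep edges rem)

def pvAcyclic (steps : List String) : Prop :=
  pvPeel (pvEdgesOf steps) (pvPartsOf steps).length (pvPartsOf steps) = []

-- ---- tie detector: the (input-determined) schedule, replayed completion by
-- completion; `false` exactly when two letters finish in the same tick.  It is
-- independent of both ports and is used only as a filter, never by the proofs.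
def pvTieReady (edges : List (Char × Char)) (parts fin runL : List Char) : List Char :=
  PySem.List.sorted
    (parts.filter (fun p => !(fin.contains p) && !(runL.contains p)
      && edges.all (fun e => !(e.2 == p) || fin.contains e.1))) (fun x => x) false

def pvTieFill (workers time now : Int) : List Char → List (Char × Int) → List (Char × Int)
  | [], run => run
  | c :: rest, run =>
    if (run.length : Int) < workers then
      pvTieFill workers time now rest (run ++ [(c, now + 1 + max (time + (c.toNat : Int) - 65) 0)])
    else run

def pvTieLoop (edges : List (Char × Char)) (parts : List Char) (workers time : Int) :
    Nat → List Char → List (Char × Int) → Bool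
  | 0, _, _ => true
  | f+1, fin, run =>
    match run with
    | [] => true
    | r0 :: rs =>
      let m := rs.foldl (fun a p => min a p.2) r0.2
      if 2 ≤ ((r0 :: rs).filter (fun p => p.2 == m)).length then false
      else
        match ((r0 :: rs).filter (fun p => p.2 == m)).map (·.1) with
        | [] => true
        | c :: _ =>
          let run' := (r0 :: rs).filter (fun p => !(p.1 == c))
          pvTieLoop edges parts workers time f (fin ++ [c])
            (pvTieFill workers time m (pvTieReady edges parts (fin ++ [c]) (run'.map (·.1))) run')

def pvNoTies (steps : List String) (workers time : Int) : Bool :=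
  pvTieLoop (pvEdgesOf steps) (pvPartsOf steps) workers time ((pvPartsOf steps).length + 1) []
    (pvTieFill workers time 0 (pvTieReady (pvEdgesOf steps) (pvPartsOf steps) [] []) [])

-- Pre_ excludes: steps shorter than 2 characters (A raises IndexError there),
-- cyclic dependency graphs and a worker count < 1 with work to do (A never
-- returns), and inputs on which two steps finish in the same tick — there the
-- relative order of those letters in A's result string follows Python's
-- set-iteration (hash) order, an accident either order of which is defensible.
def Pre_process (steps : List String) (workers : Int) (time : Int) : Prop :=
  (∀ s ∈ steps, 2 ≤ s.toList.length) ∧ pvAcyclic steps ∧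
    (pvPartsOf steps = [] ∨ 1 ≤ workers) ∧ pvNoTies steps workers time = true

instance (steps : List String) (workers : Int) (time : Int) : Decidable (Pre_process steps workers time) := by
  unfold Pre_process pvAcyclic; infer_instance

def pvWitness_process : List String × Int × Int := (["AB", "BC"], 2, 0)

def Spec_process (steps : List String) (workers : Int) (time : Int) (out : Int × String) : Prop :=
  out = process_alt steps workers time
instance (steps : List String) (workers : Int) (time : Int) (out : Int × String) : Decidable (Spec_process steps workers time out) := by
  unfold Spec_process; infer_instance

-- ===== CLAIM (what is proved, stated in full; the proofs are below) =====
def Claim_equal_process : Prop := ∀ (steps : List String) (workers : Int) (time : Int), Dom_process steps workers time → Pre_process steps workers time → Spec_process steps workers time (process steps workers time)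

-- ===== LEMMAS AND PROOFS =====

-- ---------- shared abstract notions (proof layer only) ----------

-- the distinct step letters, in port A's construction order
def pvPartsE (sps : List (Char × Char)) : PySem.Set Char :=
  PySem.Set.union (PySem.Set.ofList (sps.map (·.1))) (PySem.Set.ofList (sps.map (·.2)))

-- a letter is ready once all its prerequisites are finished
def pvReadyP (sps : List (Char × Char)) (fin : List Char) (p : Char) : Prop :=
  p ∈ pvPartsE sps ∧ p ∉ fin ∧ ∀ e ∈ sps, e.2 = p → e.1 ∈ fin

-- finished letters are closed under prerequisites
def pvDC (sps : List (Char × Char)) (fin : List Char) : Prop :=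
  ∀ e ∈ sps, e.2 ∈ fin → e.1 ∈ fin

-- the single bisimulation invariant between A's and B's per-tick states
structure pvInv (sps : List (Char × Char)) (jobs : List (Char × Int)) (parts result : List Char)
    (preds : PySem.Dict Char (PySem.Set Char)) (ready : List Char) : Prop where
  parts_mem : ∀ x, x ∈ parts ↔ x ∈ pvPartsE sps ∧ x ∉ result
  parts_nd : parts.Nodup
  preds_mem : ∀ d u, u ∈ preds.getD d PySem.Set.empty ↔ (u, d) ∈ sps ∧ u ∉ result
  preds_nd : ∀ d, (preds.getD d PySem.Set.empty).Nodup
  ready_lt : ready.Pairwise (· < ·)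
  ready_mem : ∀ x, x ∈ ready ↔ pvReadyP sps result x ∧ x ∉ jobs.map (·.1)
  jobs_nd : (jobs.map (·.1)).Nodup
  jobs_ok : ∀ p ∈ jobs, p.1 ∈ pvPartsE sps ∧ p.1 ∉ result ∧ ∀ e ∈ sps, e.2 = p.1 → e.1 ∈ result
  dc : pvDC sps result

theorem pvNodupPartsE (sps : List (Char × Char)) : (pvPartsE sps).Nodup :=
  PySem.Set.nodup_union _ _ (PySem.Set.nodup_ofList _)

theorem pvMem_partsE {sps : List (Char × Char)} {x : Char} :
    x ∈ pvPartsE sps ↔ (∃ e ∈ sps, e.1 = x ∨ e.2 = x) := by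
  simp only [pvPartsE, PySem.Set.mem_union, PySem.Set.mem_ofList, List.mem_map]
  constructor
  · rintro (⟨e, he, h⟩ | ⟨e, he, h⟩) <;> exact ⟨e, he, by tauto⟩
  · rintro ⟨e, he, h | h⟩
    · exact Or.inl ⟨e, he, h⟩
    · exact Or.inr ⟨e, he, h⟩

theorem pvEdge_mem {sps : List (Char × Char)} {e : Char × Char} (he : e ∈ sps) :
    e.1 ∈ pvPartsE sps ∧ e.2 ∈ pvPartsE sps :=
  ⟨pvMem_partsE.2 ⟨e, he, Or.inl rfl⟩, pvMem_partsE.2 ⟨e, he, Or.inr rfl⟩⟩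


-- ---------- list utilities ----------

theorem pvPairwise_lt_of_le_nodup {l : List Char} (h1 : l.Pairwise (· ≤ ·)) (h2 : l.Nodup) :
    l.Pairwise (· < ·) :=
  (h1.and h2).imp (fun hab => lt_of_le_of_ne hab.1 hab.2)

theorem pvMem_insort (x : Char) : ∀ (xs : List Char) (y : Char), y ∈ pvInsort x xs ↔ y = x ∨ y ∈ xs := by
  intro xs
  induction xs with
  | nil => intro y; simp [pvInsort]
  | cons z zs ih =>
    intro y
    rw [pvInsort]
    split_ifs with h
    · simp only [List.mem_cons, ih y]
      tauto
    · simp only [List.mem_cons]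

theorem pvInsort_pairwise {x : Char} : ∀ {xs : List Char}, xs.Pairwise (· < ·) → x ∉ xs →
    (pvInsort x xs).Pairwise (· < ·) := by
  intro xs
  induction xs with
  | nil => intro _ _; simp [pvInsort]
  | cons z zs ih =>
    intro hp hx
    rw [pvInsort]
    have hz := List.pairwise_cons.1 hp
    split_ifs with h
    · refine List.pairwise_cons.2 ⟨fun y hy => ?_, ih hz.2 (fun hmem => hx (by simp [hmem]))⟩
      rcases (pvMem_insort x zs y).1 hy with rfl | hy'
      · exact h
      · exact hz.1 y hy'
    · have hxz : x < z := lt_of_le_of_ne (not_lt.1 h) (fun he => hx (by simp [he]))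
      refine List.pairwise_cons.2 ⟨fun y hy => ?_, hp⟩
      rcases List.mem_cons.1 hy with rfl | hy'
      · exact hxz
      · exact lt_trans hxz (hz.1 y hy')

theorem pvMem_discard_foldl : ∀ (E : List Char) (parts : List Char) (x : Char),
    x ∈ E.foldl PySem.Set.discard parts ↔ x ∈ parts ∧ x ∉ E := by
  intro E
  induction E with
  | nil => intro parts x; simp
  | cons c E' ih =>
    intro parts x
    rw [List.foldl_cons, ih, PySem.Set.mem_discard]
    simp only [List.mem_cons]
    tauto

theorem pvNodup_discard_foldl : ∀ (E : List Char) (parts : List Char), parts.Nodup →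
    (E.foldl PySem.Set.discard parts).Nodup := by
  intro E
  induction E with
  | nil => intro parts h; exact h
  | cons c E' ih => intro parts h; exact ih _ (PySem.Set.nodup_discard _ _ h)

theorem pvLen_discard (parts : List Char) (c : Char) (hnd : parts.Nodup) (hc : c ∈ parts) :
    (PySem.Set.discard parts c).length + 1 = parts.length := by
  have hnd' : (PySem.Set.discard parts c).Nodup := PySem.Set.nodup_discard _ _ hnd
  have hcnot : c ∉ PySem.Set.discard parts c := fun h => ((PySem.Set.mem_discard _ _ _).1 h).2 rfl
  have hperm : parts.Perm (c :: PySem.Set.discard parts c) := by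
    refine (List.perm_ext_iff_of_nodup hnd (by simp [hnd', hcnot])).2 (fun a => ?_)
    simp only [List.mem_cons, PySem.Set.mem_discard]
    constructor
    · intro ha
      by_cases hac : a = c
      · exact Or.inl hac
      · exact Or.inr ⟨ha, hac⟩
    · rintro (rfl | ⟨ha, _⟩)
      · exact hc
      · exact ha
  have := hperm.length_eq
  simp at this
  omega

theorem pvLen_discard_foldl : ∀ (E : List Char) (parts : List Char), parts.Nodup → E.Nodup →
    (∀ c ∈ E, c ∈ parts) → (E.foldl PySem.Set.discard parts).length + E.length = parts.length := by
  intro E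
  induction E with
  | nil => intro parts _ _ _; simp
  | cons c E' ih =>
    intro parts hnd hend hsub
    rw [List.foldl_cons]
    have hc : c ∈ parts := hsub c (by simp)
    have h1 := pvLen_discard parts c hnd hc
    have h2 := ih (PySem.Set.discard parts c) (PySem.Set.nodup_discard _ _ hnd)
      (List.nodup_cons.1 hend).2 (fun d hd => (PySem.Set.mem_discard _ _ _).2
        ⟨hsub d (by simp [hd]), fun hdc => (List.nodup_cons.1 hend).1 (hdc ▸ hd)⟩)
    simp only [List.length_cons]
    omega

-- ---------- port A: one tick, in closed form ----------

theorem pvTickFold_go : ∀ (L nj : List (Char × Int)) (parts result : List Char),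
    (nj.map (·.1) ++ L.map (·.1)).Nodup →
    L.foldl (fun st jt =>
      if jt.2 > 0 then
        (PySem.Set.add st.1 (jt.1, jt.2 - 1), PySem.Set.add st.2.1 jt.1, st.2.2.1, st.2.2.2)
      else
        (st.1, st.2.1, PySem.Set.discard st.2.2.1 jt.1, st.2.2.2 ++ [jt.1]))
      (nj, nj.map (·.1), parts, result)
    = (nj ++ (L.filter (fun p => 0 < p.2)).map (fun p => (p.1, p.2 - 1)),
       nj.map (·.1) ++ ((L.filter (fun p => 0 < p.2)).map (fun p => (p.1, p.2 - 1))).map (·.1),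
       ((L.filter (fun p => p.2 ≤ 0)).map (·.1)).foldl PySem.Set.discard parts,
       result ++ (L.filter (fun p => p.2 ≤ 0)).map (·.1)) := by
  intro L
  induction L with
  | nil => intro nj parts result _; simp
  | cons jt L' ih =>
    intro nj parts result hnd
    have hjt1 : jt.1 ∉ nj.map (·.1) := by
      have h2 := (List.nodup_append.1 hnd).2.2
      intro hmem
      exact h2 jt.1 hmem jt.1 (by simp) rfl
    rw [List.foldl_cons]
    by_cases h : jt.2 > 0
    · have hadd1 : PySem.Set.add nj (jt.1, jt.2 - 1) = nj ++ [(jt.1, jt.2 - 1)] :=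
        PySem.Set.add_of_not_mem (fun hmem => hjt1 ((List.mem_map (f := fun x => x.1)).2 ⟨(jt.1, jt.2 - 1), hmem, rfl⟩))
      have hadd2 : PySem.Set.add (nj.map (·.1)) jt.1 = nj.map (·.1) ++ [jt.1] :=
        PySem.Set.add_of_not_mem hjt1
      have hmapeq : nj.map (·.1) ++ [jt.1] = (nj ++ [(jt.1, jt.2 - 1)]).map (·.1) := by
        simp
      have hnd' : ((nj ++ [(jt.1, jt.2 - 1)]).map (·.1) ++ L'.map (·.1)).Nodup := by
        have : (nj ++ [(jt.1, jt.2 - 1)]).map (·.1) ++ L'.map (·.1)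
            = nj.map (·.1) ++ (jt :: L').map (·.1) := by
          simp
        rw [this]
        exact hnd
      have hstep := ih (nj ++ [(jt.1, jt.2 - 1)]) parts result hnd'
      simp only [if_pos h, hadd1, hadd2, hmapeq]
      rw [hstep]
      have hf1 : (jt :: L').filter (fun p => 0 < p.2) = jt :: L'.filter (fun p => 0 < p.2) :=
        List.filter_cons_of_pos (by simpa using h)
      have hf2 : (jt :: L').filter (fun p => p.2 ≤ 0) = L'.filter (fun p => p.2 ≤ 0) :=
        List.filter_cons_of_neg (by simpa using h)
      rw [hf1, hf2]
      simp
    · have hnd' : (nj.map (·.1) ++ L'.map (·.1)).Nodup := by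
        refine List.Sublist.nodup ?_ hnd
        exact ((List.sublist_cons_self jt.1 (L'.map (·.1))).append_left (nj.map (·.1)))
      have hstep := ih nj (PySem.Set.discard parts jt.1) (result ++ [jt.1]) hnd'
      simp only [if_neg h]
      rw [hstep]
      have hf1 : (jt :: L').filter (fun p => 0 < p.2) = L'.filter (fun p => 0 < p.2) :=
        List.filter_cons_of_neg (by simpa using h)
      have hf2 : (jt :: L').filter (fun p => p.2 ≤ 0) = jt :: L'.filter (fun p => p.2 ≤ 0) :=
        List.filter_cons_of_pos (by simpa using not_lt.1 h)
      rw [hf1, hf2]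
      simp
theorem pvTickFold_eq (jobs : List (Char × Int)) (parts result : List Char)
    (hnd : (jobs.map (·.1)).Nodup) :
    pvTickFold jobs parts result
      = ((jobs.filter (fun p => 0 < p.2)).map (fun p => (p.1, p.2 - 1)),
         ((jobs.filter (fun p => 0 < p.2)).map (fun p => (p.1, p.2 - 1))).map (·.1),
         ((jobs.filter (fun p => p.2 ≤ 0)).map (·.1)).foldl PySem.Set.discard parts,
         result ++ (jobs.filter (fun p => p.2 ≤ 0)).map (·.1)) := by
  have h := pvTickFold_go jobs [] parts result (by simpa using hnd)
  simpa [pvTickFold, PySem.Set.empty] using h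

-- ---------- port B: unlocking the successors of a finished letter ----------

theorem pvUnlockB_fold (c : Char) : ∀ (L : List Char) (pr : PySem.Dict Char (PySem.Set Char)) (rd : List Char),
    L.Nodup →
    (∀ d, (pvUnlockB c L pr rd).1.getD d PySem.Set.empty
        = if d ∈ L then PySem.Set.discard (pr.getD d PySem.Set.empty) c
          else pr.getD d PySem.Set.empty)
    ∧ (∀ x, x ∈ (pvUnlockB c L pr rd).2 ↔ x ∈ rd ∨ (x ∈ L ∧ PySem.Set.discard (pr.getD x PySem.Set.empty) c = []))
    ∧ (rd.Pairwise (· < ·) → (∀ d ∈ L, PySem.Set.discard (pr.getD d PySem.Set.empty) c = [] → d ∉ rd) →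
        (pvUnlockB c L pr rd).2.Pairwise (· < ·)) := by
  intro L
  induction L with
  | nil =>
    intro pr rd _
    exact ⟨fun d => by simp [pvUnlockB], fun x => by simp [pvUnlockB], fun h _ => by simpa [pvUnlockB] using h⟩
  | cons d rest ih =>
    intro pr rd hnd
    have hdrest : d ∉ rest := (List.nodup_cons.1 hnd).1
    have hrestnd : rest.Nodup := (List.nodup_cons.1 hnd).2
    have hgd : (pr.modify d PySem.Set.empty (fun s => PySem.Set.discard s c)).getD d PySem.Set.empty
        = PySem.Set.discard (pr.getD d PySem.Set.empty) c :=
      PySem.Dict.getD_modify_self pr d PySem.Set.empty _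
    have hstep : pvUnlockB c (d :: rest) pr rd
        = pvUnlockB c rest (pr.modify d PySem.Set.empty (fun s => PySem.Set.discard s c))
            (if PySem.Set.discard (pr.getD d PySem.Set.empty) c = [] then pvInsort d rd else rd) := by
      simp only [pvUnlockB, List.foldl_cons, hgd]
      by_cases h : PySem.Set.discard (pr.getD d PySem.Set.empty) c = []
      · simp only [if_pos h]
      · simp only [if_neg h]
    obtain ⟨ih1, ih2, ih3⟩ := ih (pr.modify d PySem.Set.empty (fun s => PySem.Set.discard s c))
      (if PySem.Set.discard (pr.getD d PySem.Set.empty) c = [] then pvInsort d rd else rd) hrestnd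
    refine ⟨?_, ?_, ?_⟩
    · intro x
      rw [hstep, ih1 x]
      by_cases hx : x = d
      · subst hx
        rw [if_neg hdrest, hgd, if_pos (by simp)]
      · rw [PySem.Dict.getD_modify_of_ne pr PySem.Set.empty _ hx]
        by_cases hxr : x ∈ rest
        · rw [if_pos hxr, if_pos (by simp [hxr])]
        · rw [if_neg hxr, if_neg (by simp [hxr, hx])]
    · intro x
      rw [hstep, ih2 x]
      have hrest_getD : ∀ y ∈ rest, (pr.modify d PySem.Set.empty (fun s => PySem.Set.discard s c)).getD y PySem.Set.empty
          = pr.getD y PySem.Set.empty := fun y hy =>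
        PySem.Dict.getD_modify_of_ne pr PySem.Set.empty _ (fun h : y = d => hdrest (h ▸ hy))
    -- x ∈ rd' ∨ (x ∈ rest ∧ cond) ↔ x ∈ rd ∨ (x ∈ d :: rest ∧ cond)
      by_cases hcond : PySem.Set.discard (pr.getD d PySem.Set.empty) c = []
      · rw [if_pos hcond]
        constructor
        · rintro (hx | ⟨hxr, hdis⟩)
          · rcases (pvMem_insort d rd x).1 hx with rfl | hx'
            · exact Or.inr ⟨by simp, hcond⟩
            · exact Or.inl hx'
          · exact Or.inr ⟨by simp [hxr], by rw [← hrest_getD x hxr]; exact hdis⟩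
        · rintro (hx | ⟨hxdr, hdis⟩)
          · exact Or.inl ((pvMem_insort d rd x).2 (Or.inr hx))
          · rcases List.mem_cons.1 hxdr with rfl | hxr
            · exact Or.inl ((pvMem_insort x rd x).2 (Or.inl rfl))
            · exact Or.inr ⟨hxr, by rw [hrest_getD x hxr]; exact hdis⟩
      · rw [if_neg hcond]
        constructor
        · rintro (hx | ⟨hxr, hdis⟩)
          · exact Or.inl hx
          · exact Or.inr ⟨by simp [hxr], by rw [← hrest_getD x hxr]; exact hdis⟩
        · rintro (hx | ⟨hxdr, hdis⟩)
          · exact Or.inl hx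
          · rcases List.mem_cons.1 hxdr with rfl | hxr
            · exact absurd hdis hcond
            · exact Or.inr ⟨hxr, by rw [hrest_getD x hxr]; exact hdis⟩
    · intro hrd hnot
      rw [hstep]
      refine ih3 ?_ ?_
      · by_cases hcond : PySem.Set.discard (pr.getD d PySem.Set.empty) c = []
        · rw [if_pos hcond]
          exact pvInsort_pairwise hrd (hnot d (by simp) hcond)
        · rw [if_neg hcond]
          exact hrd
      · intro d' hd' hdis'
        have hne : d' ≠ d := fun h => hdrest (h ▸ hd')
        have hdis : PySem.Set.discard (pr.getD d' PySem.Set.empty) c = [] := by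
          rw [← PySem.Dict.getD_modify_of_ne pr PySem.Set.empty _ hne]
          exact hdis'
        have hnotrd : d' ∉ rd := hnot d' (by simp [hd']) hdis
        by_cases hcond : PySem.Set.discard (pr.getD d PySem.Set.empty) c = []
        · rw [if_pos hcond]
          intro hmem
          rcases (pvMem_insort d rd d').1 hmem with h | h
          · exact hne h
          · exact hnotrd h
        · rw [if_neg hcond]
          exact hnotrd

theorem pvUnlockB_spec {sps : List (Char × Char)} {R : List Char} {c : Char}
    {preds : PySem.Dict Char (PySem.Set Char)} {succList ready Excl : List Char}
    (hsl : ∀ x, x ∈ succList ↔ (c, x) ∈ sps) (hslnd : succList.Nodup)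
    (hpr : ∀ d u, u ∈ preds.getD d PySem.Set.empty ↔ (u, d) ∈ sps ∧ u ∉ R)
    (hprn : ∀ d, (preds.getD d PySem.Set.empty).Nodup)
    (hrd_lt : ready.Pairwise (· < ·))
    (hrd : ∀ x, x ∈ ready ↔ pvReadyP sps R x ∧ x ∉ (c :: Excl))
    (hcR : c ∉ R)
    (hcpre : ∀ e ∈ sps, e.2 = c → e.1 ∈ R)
    (hExcl : ∀ x ∈ Excl, ∀ e ∈ sps, e.2 = x → e.1 ∈ R)
    (hdc : pvDC sps R) :
    (∀ d u, u ∈ (pvUnlockB c succList preds ready).1.getD d PySem.Set.empty ↔ (u, d) ∈ sps ∧ u ∉ R ++ [c])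
    ∧ (∀ d, ((pvUnlockB c succList preds ready).1.getD d PySem.Set.empty).Nodup)
    ∧ (pvUnlockB c succList preds ready).2.Pairwise (· < ·)
    ∧ (∀ x, x ∈ (pvUnlockB c succList preds ready).2 ↔ pvReadyP sps (R ++ [c]) x ∧ x ∉ Excl) := by
  obtain ⟨hg, hm, hp⟩ := pvUnlockB_fold c succList preds ready hslnd
  refine ⟨?_, ?_, ?_, ?_⟩
  · intro d u
    rw [hg d]
    by_cases hd : d ∈ succList
    · rw [if_pos hd, PySem.Set.mem_discard, hpr d u]
      simp only [List.mem_append, List.mem_singleton]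
      tauto
    · rw [if_neg hd, hpr d u]
      simp only [List.mem_append, List.mem_singleton]
      constructor
      · rintro ⟨h1, h2⟩
        have huc : u ≠ c := fun h => hd ((hsl d).2 (h ▸ h1))
        exact ⟨h1, by rintro (h | h); exacts [h2 h, huc h]⟩
      · rintro ⟨h1, h2⟩
        exact ⟨h1, fun h => h2 (Or.inl h)⟩
  · intro d
    rw [hg d]
    split_ifs
    · exact PySem.Set.nodup_discard _ _ (hprn d)
    · exact hprn d
  · refine hp hrd_lt (fun d hdL hdis hdr => ?_)
    exact hcR (((hrd d).1 hdr).1.2.2 (c, d) ((hsl d).1 hdL) rfl)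
  · intro x
    rw [hm x]
    constructor
    · rintro (hx | ⟨hxs, hdis⟩)
      · obtain ⟨⟨hxP, hxnf, hall⟩, hxne⟩ := (hrd x).1 hx
        have hxc : x ≠ c := fun h => hxne (by simp [h])
        have hxE : x ∉ Excl := fun h => hxne (by simp [h])
        refine ⟨⟨hxP, ?_, fun e he h2 => List.mem_append.2 (Or.inl (hall e he h2))⟩, hxE⟩
        simp only [List.mem_append, List.mem_singleton, not_or]
        exact ⟨hxnf, hxc⟩
      · have hcx : (c, x) ∈ sps := (hsl x).1 hxs
        have hxP : x ∈ pvPartsE sps := (pvEdge_mem hcx).2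
        have hxc : x ≠ c := fun h => hcR (hcpre (c, x) hcx h)
        have hxR : x ∉ R := fun h => hcR (hdc (c, x) hcx h)
        have hxE : x ∉ Excl := fun h => hcR (hExcl x h (c, x) hcx rfl)
        refine ⟨⟨hxP, ?_, fun e he h2 => ?_⟩, hxE⟩
        · simp only [List.mem_append, List.mem_singleton, not_or]
          exact ⟨hxR, hxc⟩
        · by_cases h1 : e.1 ∈ R
          · exact List.mem_append.2 (Or.inl h1)
          · have hin : e.1 ∈ preds.getD x PySem.Set.empty :=
              (hpr x e.1).2 ⟨by rw [← h2]; simpa using he, h1⟩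
            have h1c : e.1 = c := by
              by_contra hne
              have : e.1 ∈ PySem.Set.discard (preds.getD x PySem.Set.empty) c :=
                (PySem.Set.mem_discard _ _ _).2 ⟨hin, hne⟩
              rw [hdis] at this
              simp at this
            simp [h1c]
    · rintro ⟨⟨hxP, hxnf', hall⟩, hxE⟩
      have hxc : x ≠ c := fun h => hxnf' (by simp [h])
      have hxR : x ∉ R := fun h => hxnf' (by simp [h])
      by_cases hcx : (c, x) ∈ sps
      · right
        refine ⟨(hsl x).2 hcx, ?_⟩
        rw [List.eq_nil_iff_forall_not_mem]
        intro u hu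
        obtain ⟨hu1, hu2⟩ := (PySem.Set.mem_discard _ _ _).1 hu
        obtain ⟨hux, hunf⟩ := (hpr x u).1 hu1
        have := hall (u, x) hux rfl
        simp only [List.mem_append, List.mem_singleton] at this
        rcases this with h | h
        · exact hunf h
        · exact hu2 h
      · left
        refine (hrd x).2 ⟨⟨hxP, hxR, fun e he h2 => ?_⟩, ?_⟩
        · have := hall e he h2
          simp only [List.mem_append, List.mem_singleton] at this
          rcases this with h | h
          · exact h
          · exfalso
            apply hcx
            have : e = (c, x) := Prod.ext h h2
            exact this ▸ he
        · simp only [List.mem_cons, not_or]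
          exact ⟨hxc, hxE⟩

-- ---------- port B: processing a whole expired batch ----------

theorem pvExpireB_spec {sps : List (Char × Char)} (succs : PySem.Dict Char (PySem.Set Char))
    (hsu : ∀ c v, v ∈ succs.getD c PySem.Set.empty ↔ (c, v) ∈ sps)
    (hsn : ∀ c, (succs.getD c PySem.Set.empty).Nodup) :
    ∀ (E : List Char) (preds : PySem.Dict Char (PySem.Set Char)) (ready result Lrest : List Char) (remaining : Int),
    E.Nodup →
    (∀ c ∈ E, c ∉ Lrest) →
    (∀ c ∈ E, c ∉ result ∧ ∀ e ∈ sps, e.2 = c → e.1 ∈ result) →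
    (∀ x ∈ Lrest, ∀ e ∈ sps, e.2 = x → e.1 ∈ result) →
    (∀ d u, u ∈ preds.getD d PySem.Set.empty ↔ (u, d) ∈ sps ∧ u ∉ result) →
    (∀ d, (preds.getD d PySem.Set.empty).Nodup) →
    ready.Pairwise (· < ·) →
    (∀ x, x ∈ ready ↔ pvReadyP sps result x ∧ x ∉ (E ++ Lrest)) →
    pvDC sps result →
    (pvExpireB succs E (preds, ready, remaining, result)).2.2.1 = remaining - E.length
    ∧ (pvExpireB succs E (preds, ready, remaining, result)).2.2.2 = result ++ E
    ∧ (∀ d u, u ∈ (pvExpireB succs E (preds, ready, remaining, result)).1.getD d PySem.Set.empty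
        ↔ (u, d) ∈ sps ∧ u ∉ result ++ E)
    ∧ (∀ d, ((pvExpireB succs E (preds, ready, remaining, result)).1.getD d PySem.Set.empty).Nodup)
    ∧ (pvExpireB succs E (preds, ready, remaining, result)).2.1.Pairwise (· < ·)
    ∧ (∀ x, x ∈ (pvExpireB succs E (preds, ready, remaining, result)).2.1
        ↔ pvReadyP sps (result ++ E) x ∧ x ∉ Lrest)
    ∧ pvDC sps (result ++ E) := by
  intro E
  induction E with
  | nil =>
    intro preds ready result Lrest remaining _ _ _ _ hpr hprn hrd_lt hrd hdc
    refine ⟨by simp [pvExpireB], by simp [pvExpireB], ?_, ?_, ?_, ?_, ?_⟩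
    · intro d u; simpa [pvExpireB] using hpr d u
    · intro d; simpa [pvExpireB] using hprn d
    · simpa [pvExpireB] using hrd_lt
    · intro x; simpa [pvExpireB] using hrd x
    · simpa using hdc
  | cons c E' ih =>
    intro preds ready result Lrest remaining hnd hnl hE hL hpr hprn hrd_lt hrd hdc
    have hcE : c ∉ result ∧ ∀ e ∈ sps, e.2 = c → e.1 ∈ result := hE c (by simp)
    have hsl : ∀ x, x ∈ PySem.List.sorted (succs.getD c PySem.Set.empty) (fun x => x) false
        ↔ (c, x) ∈ sps := fun x => by
      rw [(PySem.List.sorted_perm _ _ _).mem_iff]; exact hsu c x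
    have hslnd : (PySem.List.sorted (succs.getD c PySem.Set.empty) (fun x => x) false).Nodup :=
      ((PySem.List.sorted_perm _ _ _).nodup_iff).2 (hsn c)
    have hrd' : ∀ x, x ∈ ready ↔ pvReadyP sps result x ∧ x ∉ (c :: (E' ++ Lrest)) := by
      intro x; rw [hrd x]; simp
    have hExcl : ∀ x ∈ E' ++ Lrest, ∀ e ∈ sps, e.2 = x → e.1 ∈ result := by
      intro x hx
      rcases List.mem_append.1 hx with h | h
      · exact (hE x (by simp [h])).2
      · exact hL x h
    obtain ⟨ha, hb, hc', hd⟩ := pvUnlockB_spec hsl hslnd hpr hprn hrd_lt hrd' hcE.1 hcE.2 hExcl hdc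
    have hdc' : pvDC sps (result ++ [c]) := by
      intro e he h2
      rcases List.mem_append.1 h2 with h | h
      · exact List.mem_append.2 (Or.inl (hdc e he h))
      · exact List.mem_append.2 (Or.inl (hcE.2 e he (by simpa using h)))
    have hstep : pvExpireB succs (c :: E') (preds, ready, remaining, result)
        = pvExpireB succs E'
            ((pvUnlockB c (PySem.List.sorted (succs.getD c PySem.Set.empty) (fun x => x) false) preds ready).1,
             (pvUnlockB c (PySem.List.sorted (succs.getD c PySem.Set.empty) (fun x => x) false) preds ready).2,
             remaining - 1, result ++ [c]) := by
      simp [pvExpireB, List.foldl_cons]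
    have hndE' : E'.Nodup := (List.nodup_cons.1 hnd).2
    have hcE' : c ∉ E' := (List.nodup_cons.1 hnd).1
    obtain ⟨o1, o2, o3, o4, o5, o6, o7⟩ := ih
      (pvUnlockB c (PySem.List.sorted (succs.getD c PySem.Set.empty) (fun x => x) false) preds ready).1
      (pvUnlockB c (PySem.List.sorted (succs.getD c PySem.Set.empty) (fun x => x) false) preds ready).2
      (result ++ [c]) Lrest (remaining - 1)
      hndE' (fun d hdE => hnl d (by simp [hdE]))
      (fun d hdE => ⟨by
          simp only [List.mem_append, List.mem_singleton, not_or]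
          exact ⟨(hE d (by simp [hdE])).1, fun h => hcE' (h ▸ hdE)⟩,
        fun e he h2 => List.mem_append.2 (Or.inl ((hE d (by simp [hdE])).2 e he h2))⟩)
      (fun x hx e he h2 => List.mem_append.2 (Or.inl (hL x hx e he h2)))
      ha hb hc' hd hdc'
    rw [hstep]
    refine ⟨?_, ?_, ?_, o4, o5, ?_, ?_⟩
    · rw [o1]; simp only [List.length_cons]; push_cast; ring
    · rw [o2]; simp
    · intro d u; rw [o3 d u]; simp [List.append_assoc]
    · intro x; rw [o6 x]; simp [List.append_assoc]
    · simpa [List.append_assoc] using o7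

-- ---------- scheduling: both ports start the same prefix of the ready pool ----------

theorem pvSched_eq (workers time : Int) : ∀ (todo : List Char) (jobs : List (Char × Int)),
    todo.Nodup →
    (∀ c ∈ todo, c ∉ jobs.map (·.1)) →
    ∃ k, k ≤ todo.length ∧
      pvSchedBQ workers time todo jobs
        = (todo.drop k, jobs ++ (todo.take k).map (fun c => (c, time + (c.toNat : Int) - 65)))
      ∧ pvSchedA workers time jobs todo
        = jobs ++ (todo.take k).map (fun c => (c, time + (c.toNat : Int) - 65)) := by
  intro todo
  induction todo with
  | nil => intro jobs _ _; exact ⟨0, by simp [pvSchedBQ, pvSchedA]⟩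
  | cons c rest ih =>
    intro jobs hnd hdis
    by_cases h : (jobs.length : Int) < workers
    · have hcj : (c, time + (c.toNat : Int) - 65) ∉ jobs := by
        intro hmem
        exact hdis c (by simp) ((List.mem_map (f := fun x => x.1)).2 ⟨_, hmem, rfl⟩)
      have hadd : PySem.Set.add jobs (c, time + (c.toNat : Int) - 65)
          = jobs ++ [(c, time + (c.toNat : Int) - 65)] := PySem.Set.add_of_not_mem hcj
      have hdis' : ∀ d ∈ rest, d ∉ (jobs ++ [(c, time + (c.toNat : Int) - 65)]).map (·.1) := by
        intro d hd hmem
        rw [List.map_append] at hmem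
        rcases List.mem_append.1 hmem with hm | hm
        · exact hdis d (by simp [hd]) hm
        · have : d = c := by simpa using hm
          exact (List.nodup_cons.1 hnd).1 (this ▸ hd)
      obtain ⟨k, hk, hB, hA⟩ := ih (jobs ++ [(c, time + (c.toNat : Int) - 65)])
        (List.nodup_cons.1 hnd).2 hdis'
      refine ⟨k + 1, by simpa using Nat.succ_le_succ hk, ?_, ?_⟩
      · rw [pvSchedBQ, if_pos h, hB]
        simp [List.append_assoc]
      · rw [pvSchedA, if_pos h, hadd, hA]
        simp [List.append_assoc]
    · refine ⟨0, Nat.zero_le _, ?_, ?_⟩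
      · rw [pvSchedBQ, if_neg h]; simp
      · rw [pvSchedA, if_neg h]; simp

-- ---------- small pieces for the per-tick step ----------

theorem pvSorted_eq {xs ys : List Char} (hnd : xs.Nodup) (hys : ys.Pairwise (· < ·))
    (hmem : ∀ x, x ∈ ys ↔ x ∈ xs) : PySem.List.sorted xs (fun x => x) false = ys := by
  have hynd : ys.Nodup := hys.imp (fun h => ne_of_lt h)
  exact PySem.List.sorted_eq_of_perm_of_pairwise_lt _ _ _
    ((List.perm_ext_iff_of_nodup hynd hnd).2 hmem) hys

theorem pvJfst (jobs : List (Char × Int)) :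
    ((jobs.filter (fun p => 0 < p.2)).map (fun p => (p.1, p.2 - 1))).map (·.1)
      = (jobs.filter (fun p => 0 < p.2)).map (·.1) := by
  rw [List.map_map]; rfl

theorem pvMem_fst_split {jobs : List (Char × Int)} {x : Char} :
    x ∈ jobs.map (·.1)
      ↔ x ∈ (jobs.filter (fun p => p.2 ≤ 0)).map (·.1)
        ∨ x ∈ (jobs.filter (fun p => 0 < p.2)).map (·.1) := by
  simp only [List.mem_map, List.mem_filter, decide_eq_true_eq]
  constructor
  · rintro ⟨p, hp, rfl⟩
    by_cases h : p.2 ≤ 0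
    · exact Or.inl ⟨p, ⟨hp, h⟩, rfl⟩
    · exact Or.inr ⟨p, ⟨hp, by omega⟩, rfl⟩
  · rintro (⟨p, ⟨hp, _⟩, rfl⟩ | ⟨p, ⟨hp, _⟩, rfl⟩) <;> exact ⟨p, hp, rfl⟩

theorem pvFst_disjoint {jobs : List (Char × Int)} (jnd : (jobs.map (·.1)).Nodup) :
    ∀ c ∈ (jobs.filter (fun p => p.2 ≤ 0)).map (·.1),
      c ∉ (jobs.filter (fun p => 0 < p.2)).map (·.1) := by
  intro c hc hc'
  simp only [List.mem_map, List.mem_filter, decide_eq_true_eq] at hc hc'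
  obtain ⟨p, ⟨hp, hple⟩, hpc⟩ := hc
  obtain ⟨q, ⟨hq, hqpos⟩, hqc⟩ := hc'
  have : p = q := List.inj_on_of_nodup_map jnd hp hq (by rw [hpc, hqc])
  subst this
  omega

theorem pvMem_drop_iff {l : List Char} {k : Nat} (hnd : l.Nodup) {x : Char} :
    x ∈ l.drop k ↔ x ∈ l ∧ x ∉ l.take k := by
  have h : l.take k ++ l.drop k = l := List.take_append_drop k l
  have hnd' : (l.take k ++ l.drop k).Nodup := by rw [h]; exact hnd
  have hdisj := (List.nodup_append.1 hnd').2.2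
  constructor
  · intro hx
    refine ⟨by rw [← h]; exact List.mem_append.2 (Or.inr hx), fun hxt => ?_⟩
    exact hdisj x hxt x hx rfl
  · rintro ⟨hx, hnt⟩
    rw [← h] at hx
    rcases List.mem_append.1 hx with hm | hm
    · exact absurd hm hnt
    · exact hm

-- the prerequisite set computed by port A, w.r.t. a finished list
theorem pvMem_preReqs {sps : List (Char × Char)} {fin : List Char} {p : Char} :
    p ∈ PySem.Set.ofList ((sps.filter (fun e => !(fin.contains e.1))).map (·.2)) ↔
      ∃ e ∈ sps, e.1 ∉ fin ∧ e.2 = p := by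
  simp only [PySem.Set.mem_ofList, List.mem_map, List.mem_filter, Bool.not_eq_eq_eq_not,
    Bool.not_true, List.contains_eq_mem, decide_eq_false_iff_not]
  constructor
  · rintro ⟨e, ⟨he, h1⟩, h2⟩
    exact ⟨e, he, h1, h2⟩
  · rintro ⟨e, he, h1, h2⟩
    exact ⟨e, ⟨he, h1⟩, h2⟩

theorem pvNotContains_iff (S : List Char) (x : Char) :
    (!(PySem.Set.contains S x)) = true ↔ x ∉ S := by
  rw [Bool.not_eq_true']
  constructor
  · intro h hx
    rw [(PySem.Set.contains_iff S x).2 hx] at h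
    cases h
  · intro h
    by_contra hne
    have hT : PySem.Set.contains S x = true := by
      revert hne; cases PySem.Set.contains S x <;> simp
    exact h ((PySem.Set.contains_iff S x).1 hT)

-- ---------- the bisimulation ----------

theorem pvBisim (sps : List (Char × Char)) (succs : PySem.Dict Char (PySem.Set Char)) (workers time : Int)
    (hsu : ∀ c v, v ∈ succs.getD c PySem.Set.empty ↔ (c, v) ∈ sps)
    (hsn : ∀ c, (succs.getD c PySem.Set.empty).Nodup) :
    ∀ (fuel : Nat) (jobs : List (Char × Int)) (parts result : List Char)
      (preds : PySem.Dict Char (PySem.Set Char)) (ready : List Char) (clock : Int),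
    pvInv sps jobs parts result preds ready →
    pvLoopA sps workers time fuel jobs parts result clock
      = pvLoopB succs workers time fuel preds ready jobs ((parts.length : Int)) result clock := by
  intro fuel
  induction fuel with
  | zero => intro jobs parts result preds ready clock _; rfl
  | succ fuel ih =>
    intro jobs parts result preds ready clock hinv
    obtain ⟨pm, pnd, prm, prn, rlt, rm, jnd, jok, hdc⟩ := hinv
    by_cases hrem : (parts.length : Int) = 0
    · have hparts : parts = [] := by
        have : parts.length = 0 := by exact_mod_cast hrem
        exact List.eq_nil_of_length_eq_zero this
      have hjobs : jobs = [] := by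
        cases hj : jobs with
        | nil => rfl
        | cons j js =>
          exfalso
          have hj1 := jok j (by rw [hj]; simp)
          have : j.1 ∈ parts := (pm j.1).2 ⟨hj1.1, hj1.2.1⟩
          rw [hparts] at this
          simp at this
      subst hparts
      subst hjobs
      simp [pvLoopA, pvLoopB, pvTickFold]
    · simp only [pvLoopA, pvLoopB]
      rw [if_neg hrem]
      have htf := pvTickFold_eq jobs parts result jnd
      -- names for the pieces
      set E : List Char := (jobs.filter (fun p => p.2 ≤ 0)).map (·.1) with hE
      set J' : List (Char × Int) := (jobs.filter (fun p => 0 < p.2)).map (fun p => (p.1, p.2 - 1)) with hJ'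
      set partsD : List Char := E.foldl PySem.Set.discard parts with hpartsD
      -- basic facts about E and J'
      have hEsub : E.Sublist (jobs.map (·.1)) := List.filter_sublist.map _
      have hEnd : E.Nodup := hEsub.nodup jnd
      have hJfst : J'.map (·.1) = (jobs.filter (fun p => 0 < p.2)).map (·.1) := pvJfst jobs
      have hJsub : J'.map (·.1) ⊆ jobs.map (·.1) := by
        rw [hJfst]; exact (List.filter_sublist.map _).subset
      have hJnd : (J'.map (·.1)).Nodup := by
        rw [hJfst]; exact (List.filter_sublist.map _).nodup jnd
      have hEdisj : ∀ c ∈ E, c ∉ J'.map (·.1) := by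
        intro c hc
        rw [hJfst]; exact pvFst_disjoint jnd c hc
      have hEwit : ∀ c ∈ E, ∃ p ∈ jobs, p.1 = c := by
        intro c hc
        simp only [hE, List.mem_map, List.mem_filter] at hc
        obtain ⟨p, ⟨hp, _⟩, hpc⟩ := hc
        exact ⟨p, hp, hpc⟩
      have hJwit : ∀ c ∈ J'.map (·.1), ∃ p ∈ jobs, p.1 = c := by
        intro c hc
        rw [hJfst] at hc
        simp only [List.mem_map, List.mem_filter] at hc
        obtain ⟨p, ⟨hp, _⟩, hpc⟩ := hc
        exact ⟨p, hp, hpc⟩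
      have hEfacts : ∀ c ∈ E, c ∉ result ∧ ∀ e ∈ sps, e.2 = c → e.1 ∈ result := by
        intro c hc
        obtain ⟨p, hp, hpc⟩ := hEwit c hc
        have := jok p hp
        exact ⟨hpc ▸ this.2.1, hpc ▸ this.2.2⟩
      have hLfacts : ∀ x ∈ J'.map (·.1), ∀ e ∈ sps, e.2 = x → e.1 ∈ result := by
        intro x hx
        obtain ⟨p, hp, hpc⟩ := hJwit x hx
        exact hpc ▸ (jok p hp).2.2
      have hrm' : ∀ x, x ∈ ready ↔ pvReadyP sps result x ∧ x ∉ (E ++ J'.map (·.1)) := by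
        intro x
        rw [rm x]
        have : x ∈ jobs.map (·.1) ↔ x ∈ E ∨ x ∈ J'.map (·.1) := by
          rw [hJfst]; exact pvMem_fst_split
        constructor
        · rintro ⟨h1, h2⟩
          exact ⟨h1, fun hm => h2 (this.2 (List.mem_append.1 hm))⟩
        · rintro ⟨h1, h2⟩
          exact ⟨h1, fun hm => h2 (List.mem_append.2 (this.1 hm))⟩
      obtain ⟨o1, o2, o3, o4, o5, o6, o7⟩ := pvExpireB_spec succs hsu hsn E preds ready result
        (J'.map (·.1)) ((parts.length : Int)) hEnd hEdisj hEfacts hLfacts prm prn rlt hrm' hdc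
      -- lengths
      have hEparts : ∀ c ∈ E, c ∈ parts := by
        intro c hc
        obtain ⟨p, hp, hpc⟩ := hEwit c hc
        exact (pm c).2 ⟨hpc ▸ (jok p hp).1, hpc ▸ (jok p hp).2.1⟩
      have hlen : partsD.length + E.length = parts.length :=
        pvLen_discard_foldl E parts pnd hEnd hEparts
      have hremD : (parts.length : Int) - (E.length : Int) = (partsD.length : Int) := by
        omega
      -- rewrite the A side tick
      rw [htf]
      by_cases hfin : partsD = []
      · rw [if_pos hfin]
        have hz : (pvExpireB succs E (preds, ready, (parts.length : Int), result)).2.2.1 = 0 := by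
          rw [o1, hremD, hfin]
          simp
        rw [hz, if_pos rfl, o2]
      · rw [if_neg hfin]
        have hz : ¬ (pvExpireB succs E (preds, ready, (parts.length : Int), result)).2.2.1 = 0 := by
          rw [o1, hremD]
          intro h0
          have : partsD.length = 0 := by exact_mod_cast h0
          exact hfin (List.eq_nil_of_length_eq_zero this)
        rw [if_neg hz]
        -- the A-side to-do list equals the B-side ready pool
        have hpartsD_mem : ∀ x, x ∈ partsD ↔ x ∈ pvPartsE sps ∧ x ∉ result ++ E := by
          intro x
          rw [hpartsD, pvMem_discard_foldl, pm x]
          simp only [List.mem_append, not_or]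
          tauto
        have hpartsD_nd : partsD.Nodup := pvNodup_discard_foldl E parts pnd
        have htodo : PySem.List.sorted
            (partsD.filter (fun p =>
              !(PySem.Set.contains (PySem.Set.ofList ((sps.filter
                  (fun e => !((result ++ E).contains e.1))).map (·.2))) p)
                && !(PySem.Set.contains (J'.map (·.1)) p)))
            (fun x => x) false
            = (pvExpireB succs E (preds, ready, (parts.length : Int), result)).2.1 := by
          refine pvSorted_eq (hpartsD_nd.filter _) o5 (fun x => ?_)
          rw [o6 x, List.mem_filter, Bool.and_eq_true, pvNotContains_iff, pvNotContains_iff,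
            hpartsD_mem x]
          constructor
          · rintro ⟨⟨hxP, hxnf, hall⟩, hxL⟩
            refine ⟨⟨hxP, hxnf⟩, fun hpre => ?_, hxL⟩
            obtain ⟨e, he, h1, h2⟩ := pvMem_preReqs.1 hpre
            exact h1 (hall e he h2)
          · rintro ⟨⟨hxP, hxnf⟩, hpre, hxL⟩
            refine ⟨⟨hxP, hxnf, fun e he h2 => ?_⟩, hxL⟩
            by_contra h1
            exact hpre (pvMem_preReqs.2 ⟨e, he, h1, h2⟩)
        rw [htodo]
        -- scheduling
        set ready' : List Char := (pvExpireB succs E (preds, ready, (parts.length : Int), result)).2.1 with hready'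
        have hready'_nd : ready'.Nodup := o5.imp (fun h => ne_of_lt h)
        have hready'_dis : ∀ c ∈ ready', c ∉ J'.map (·.1) := fun c hc => ((o6 c).1 hc).2
        obtain ⟨k, hkle, hB, hA⟩ := pvSched_eq workers time ready' J' hready'_nd hready'_dis
        rw [hA, hB]
        -- new started jobs
        set NEW : List (Char × Int) := (ready'.take k).map (fun c => (c, time + (c.toNat : Int) - 65)) with hNEW
        have hcomp : ((fun (x : Char × Int) => x.1) ∘ (fun c : Char => (c, time + (c.toNat : Int) - 65)))
            = fun c : Char => c := rfl
        have hNEWfst : NEW.map (·.1) = ready'.take k := by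
          simp [hNEW, List.map_map, hcomp]
        -- invariant for the next tick
        have htake_sub : ∀ c ∈ ready'.take k, c ∈ ready' := fun c hc => (List.take_sublist _ _).subset hc
        have hinv' : pvInv sps (J' ++ NEW) partsD (result ++ E)
            (pvExpireB succs E (preds, ready, (parts.length : Int), result)).1 (ready'.drop k) := by
          refine ⟨hpartsD_mem, hpartsD_nd, o3, o4, o5.sublist (List.drop_sublist _ _), ?_, ?_, ?_, o7⟩
          · intro x
            rw [pvMem_drop_iff hready'_nd, o6 x]
            rw [List.map_append, hNEWfst]
            simp only [List.mem_append, not_or]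
            tauto
          · rw [List.map_append, hNEWfst]
            refine List.Nodup.append hJnd ((o5.sublist (List.take_sublist _ _)).imp (fun h => ne_of_lt h)) ?_
            intro c hc1 hc2
            exact hready'_dis c (htake_sub c hc2) hc1
          · intro p hp
            rcases List.mem_append.1 hp with hm | hm
            · simp only [hJ', List.mem_map, List.mem_filter, decide_eq_true_eq] at hm
              obtain ⟨q, ⟨hq, _⟩, rfl⟩ := hm
              have hq' := jok q hq
              have hqE : q.1 ∉ E := fun hqe => hEdisj q.1 hqe (by
                rw [hJfst]
                simp only [List.mem_map, List.mem_filter, decide_eq_true_eq]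
                exact ⟨q, ⟨hq, by simpa using (by simp only [hJ', List.mem_map, List.mem_filter, decide_eq_true_eq] at *; omega : 0 < q.2)⟩, rfl⟩)
              refine ⟨hq'.1, ?_, fun e he h2 => List.mem_append.2 (Or.inl (hq'.2.2 e he h2))⟩
              simp only [List.mem_append, not_or]
              exact ⟨hq'.2.1, hqE⟩
            · simp only [hNEW, List.mem_map] at hm
              obtain ⟨c, hc, rfl⟩ := hm
              have hcr := ((o6 c).1 (htake_sub c hc)).1
              exact ⟨hcr.1, hcr.2.1, hcr.2.2⟩
        rw [o1, hremD, o2]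
        dsimp only
        exact ih (J' ++ NEW) partsD (result ++ E)
          (pvExpireB succs E (preds, ready, (parts.length : Int), result)).1 (ready'.drop k) (clock + 1) hinv'
-- ---------- reading the edges / building the maps (shared top-level glue) ----------

-- invariant of the dictionary-building fold of port B
def pvMapsInv (es : List (Char × Char)) (pr su : PySem.Dict Char (PySem.Set Char)) : Prop :=
  (∀ d u, u ∈ pr.getD d PySem.Set.empty ↔ (u, d) ∈ es) ∧
  (∀ d, (pr.getD d PySem.Set.empty).Nodup) ∧
  (∀ c v, v ∈ su.getD c PySem.Set.empty ↔ (c, v) ∈ es) ∧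
  (∀ c, (su.getD c PySem.Set.empty).Nodup) ∧
  pr.keys.Nodup ∧ (∀ p, p ∈ pr.keys ↔ p ∈ pvPartsE es) ∧
  (∀ q, su.contains q = pr.contains q)

theorem pvMem_partsE_append {es : List (Char × Char)} {u v x : Char} :
    x ∈ pvPartsE (es ++ [(u, v)]) ↔ x ∈ pvPartsE es ∨ x = u ∨ x = v := by
  rw [pvMem_partsE, pvMem_partsE]
  constructor
  · rintro ⟨e, he, hx⟩
    rcases List.mem_append.1 he with h | h
    · exact Or.inl ⟨e, h, hx⟩
    · simp only [List.mem_singleton] at h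
      subst h
      rcases hx with h | h
      · exact Or.inr (Or.inl h.symm)
      · exact Or.inr (Or.inr h.symm)
  · rintro (⟨e, he, hx⟩ | h | h)
    · exact ⟨e, List.mem_append.2 (Or.inl he), hx⟩
    · exact ⟨(u, v), List.mem_append.2 (Or.inr (by simp)), Or.inl h.symm⟩
    · exact ⟨(u, v), List.mem_append.2 (Or.inr (by simp)), Or.inr h.symm⟩

-- one guard application ("if p not in preds: preds[p]=set(); succs[p]=set()")
theorem pvGuard_one {pr su : PySem.Dict Char (PySem.Set Char)} (p : Char)
    (hknd : pr.keys.Nodup) (hsync : ∀ q, su.contains q = pr.contains q) :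
    (∀ d, ((if pr.contains p then (pr, su)
        else (pr.insert p PySem.Set.empty, su.insert p PySem.Set.empty)).1.getD d PySem.Set.empty)
        = pr.getD d PySem.Set.empty) ∧
    (∀ c, ((if pr.contains p then (pr, su)
        else (pr.insert p PySem.Set.empty, su.insert p PySem.Set.empty)).2.getD c PySem.Set.empty)
        = su.getD c PySem.Set.empty) ∧
    (if pr.contains p then (pr, su)
        else (pr.insert p PySem.Set.empty, su.insert p PySem.Set.empty)).1.keys.Nodup ∧
    (∀ q, q ∈ (if pr.contains p then (pr, su)
        else (pr.insert p PySem.Set.empty, su.insert p PySem.Set.empty)).1.keys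
        ↔ q ∈ pr.keys ∨ q = p) ∧
    (∀ q, (if pr.contains p then (pr, su)
        else (pr.insert p PySem.Set.empty, su.insert p PySem.Set.empty)).2.contains q
        = (if pr.contains p then (pr, su)
        else (pr.insert p PySem.Set.empty, su.insert p PySem.Set.empty)).1.contains q) := by
  by_cases hcp : pr.contains p = true
  · rw [if_pos hcp]
    refine ⟨fun d => rfl, fun c => rfl, hknd, fun q => ?_, hsync⟩
    constructor
    · exact Or.inl
    · rintro (h | rfl)
      · exact h
      · exact (PySem.Dict.contains_iff_mem_keys pr q).1 hcp
  · rw [if_neg hcp]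
    have hcp' : pr.contains p = false := by
      revert hcp; cases pr.contains p <;> simp
    have hsp' : su.contains p = false := by rw [hsync p]; exact hcp'
    refine ⟨fun d => ?_, fun c => ?_, ?_, fun q => ?_, fun q => ?_⟩
    · rw [PySem.Dict.getD_insert]
      split_ifs with h
      · subst h
        rw [PySem.Dict.getD_of_not_contains pr PySem.Set.empty hcp']
      · rfl
    · rw [PySem.Dict.getD_insert]
      split_ifs with h
      · subst h
        rw [PySem.Dict.getD_of_not_contains su PySem.Set.empty hsp']
      · rfl
    · exact PySem.Dict.nodup_keys_insert pr p PySem.Set.empty hknd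
    · rw [PySem.Dict.keys_insert_of_not_contains pr PySem.Set.empty hcp']
      simp
    · rw [PySem.Dict.contains_insert, PySem.Dict.contains_insert, hsync q]

-- processing one edge (u, v) of the build fold
theorem pvBuildStep {es : List (Char × Char)} {pr su : PySem.Dict Char (PySem.Set Char)}
    (h : pvMapsInv es pr su) (u v : Char) :
    pvMapsInv (es ++ [(u, v)])
      ((([u, v].foldl (fun st p =>
          if st.1.contains p then st
          else (st.1.insert p PySem.Set.empty, st.2.insert p PySem.Set.empty)) (pr, su)).1.modify v
            PySem.Set.empty (fun x => PySem.Set.add x u)))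
      ((([u, v].foldl (fun st p =>
          if st.1.contains p then st
          else (st.1.insert p PySem.Set.empty, st.2.insert p PySem.Set.empty)) (pr, su)).2.modify u
            PySem.Set.empty (fun x => PySem.Set.add x v))) := by
  obtain ⟨hprE, hprN, hsuE, hsuN, hkN, hkM, hsync⟩ := h
  obtain ⟨g1a, g1b, g1c, g1d, g1e⟩ := pvGuard_one (pr := pr) (su := su) u hkN hsync
  set st1 := (if pr.contains u then (pr, su)
      else (pr.insert u PySem.Set.empty, su.insert u PySem.Set.empty)) with hst1
  obtain ⟨g2a, g2b, g2c, g2d, g2e⟩ := pvGuard_one (pr := st1.1) (su := st1.2) v g1c g1e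
  set st2 := (if st1.1.contains v then (st1.1, st1.2)
      else (st1.1.insert v PySem.Set.empty, st1.2.insert v PySem.Set.empty)) with hst2
  have hfold : [u, v].foldl (fun st p =>
      if st.1.contains p then st
      else (st.1.insert p PySem.Set.empty, st.2.insert p PySem.Set.empty)) (pr, su) = st2 := rfl
  rw [hfold]
  have hvkeys : st2.1.contains v = true := by
    rw [PySem.Dict.contains_iff_mem_keys _ v, g2d]
    simp
  have hukeys : st2.1.contains u = true := by
    rw [PySem.Dict.contains_iff_mem_keys _ u, g2d, g1d]
    simp
  refine ⟨?_, ?_, ?_, ?_, ?_, ?_, ?_⟩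
  · intro d x
    rw [PySem.Dict.getD_modify]
    split_ifs with hd
    · subst hd
      rw [PySem.Set.mem_add, g2a, g1a, hprE d x]
      simp only [List.mem_append, List.mem_singleton, Prod.mk.injEq]
      tauto
    · rw [g2a, g1a, hprE d x]
      simp only [List.mem_append, List.mem_singleton, Prod.mk.injEq]
      constructor
      · exact fun h2 => Or.inl h2
      · rintro (h2 | ⟨_, h2⟩)
        · exact h2
        · exact absurd h2 hd
  · intro d
    rw [PySem.Dict.getD_modify]
    split_ifs with hd
    · subst hd
      rw [g2a, g1a]
      exact PySem.Set.nodup_add _ _ (hprN d)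
    · rw [g2a, g1a]
      exact hprN d
  · intro cc x
    rw [PySem.Dict.getD_modify]
    split_ifs with hd
    · subst hd
      rw [PySem.Set.mem_add, g2b, g1b, hsuE cc x]
      simp only [List.mem_append, List.mem_singleton, Prod.mk.injEq]
      tauto
    · rw [g2b, g1b, hsuE cc x]
      simp only [List.mem_append, List.mem_singleton, Prod.mk.injEq]
      constructor
      · exact fun h2 => Or.inl h2
      · rintro (h2 | ⟨h2, _⟩)
        · exact h2
        · exact absurd h2 hd
  · intro cc
    rw [PySem.Dict.getD_modify]
    split_ifs with hd
    · subst hd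
      rw [g2b, g1b]
      exact PySem.Set.nodup_add _ _ (hsuN cc)
    · rw [g2b, g1b]
      exact hsuN cc
  · rw [PySem.Dict.keys_modify, PySem.Dict.keys_insert_of_contains _ _ hvkeys]
    exact g2c
  · intro p
    rw [PySem.Dict.keys_modify, PySem.Dict.keys_insert_of_contains _ _ hvkeys, g2d, g1d,
      pvMem_partsE_append]
    rw [hkM p]
    tauto
  · intro q
    rw [Bool.eq_iff_iff]
    rw [PySem.Dict.contains_iff_mem_keys, PySem.Dict.contains_iff_mem_keys,
      PySem.Dict.keys_modify, PySem.Dict.keys_modify,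
      PySem.Dict.keys_insert_of_contains _ _ hvkeys,
      PySem.Dict.keys_insert_of_contains _ _ (by rw [g2e]; exact hukeys)]
    rw [← PySem.Dict.contains_iff_mem_keys, ← PySem.Dict.contains_iff_mem_keys, g2e]

theorem pvBuild_some : ∀ (steps : List String) (sps es : List (Char × Char))
    (pr su : PySem.Dict Char (PySem.Set Char)),
    pvEdges? steps = some sps → pvMapsInv es pr su →
    ∃ pr' su', pvBuildMaps? steps (pr, su) = some (pr', su') ∧ pvMapsInv (es ++ sps) pr' su' := by
  intro steps
  induction steps with
  | nil =>
    intro sps es pr su he hinv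
    have hsps : sps = [] := by
      rw [pvEdges?] at he
      simpa [eq_comm] using he
    subst hsps
    exact ⟨pr, su, rfl, by simpa using hinv⟩
  | cons st rest ih =>
    intro sps es pr su he hinv
    rw [pvEdges?, List.mapM_cons] at he
    rcases h0 : PySem.Str.pyGet? st 0 with _ | a
    · rw [h0] at he; simp at he
    rw [h0] at he
    rcases h1 : PySem.Str.pyGet? st 1 with _ | b
    · rw [h1] at he; simp at he
    rw [h1] at he
    rcases hr : rest.mapM (fun s => do
        let a ← PySem.Str.pyGet? s 0
        let b ← PySem.Str.pyGet? s 1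
        pure (a, b)) with _ | sps''
    · rw [hr] at he; simp at he
    rw [hr] at he
    have hsps : sps = (a, b) :: sps'' := by simpa [eq_comm] using he
    subst hsps
    obtain ⟨pr', su', heq, hinv'⟩ := ih sps'' (es ++ [(a, b)]) _ _ (by rw [pvEdges?]; exact hr)
      (pvBuildStep hinv a b)
    refine ⟨pr', su', ?_, ?_⟩
    · rw [pvBuildMaps?, h0, h1]
      exact heq
    · simpa [List.append_assoc] using hinv'

theorem pvBuild_none' {steps : List String} (he : pvEdges? steps = none) :
    ∀ st, pvBuildMaps? steps st = none := by
  induction steps with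
  | nil => intro st; rw [pvEdges?] at he; simp at he
  | cons s rest ih =>
    intro st
    rw [pvEdges?, List.mapM_cons] at he
    rw [pvBuildMaps?]
    rcases h0 : PySem.Str.pyGet? s 0 with _ | a
    · rfl
    rcases h1 : PySem.Str.pyGet? s 1 with _ | b
    · rfl
    refine ih ?_ _
    rw [pvEdges?]
    rw [h0, h1] at he
    rcases hr : rest.mapM (fun s => do
        let a ← PySem.Str.pyGet? s 0
        let b ← PySem.Str.pyGet? s 1
        pure (a, b)) with _ | sps'
    · exact hr
    · rw [hr] at he; simp at he

theorem pvBuild_none {steps : List String} (he : pvEdges? steps = none) :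
    pvBuildMaps? steps (PySem.Dict.empty, PySem.Dict.empty) = none :=
  pvBuild_none' he _

-- ---------- fuel: the two bounds are the same number ----------

theorem pvFuel_sum (time : Int) : ∀ (l : List Char) (a : Nat),
    l.foldl (fun acc c => acc + 1 + (time + (c.toNat : Int) - 65).toNat) a
      = a + (l.map (fun c => 1 + (time + (c.toNat : Int) - 65).toNat)).sum := by
  intro l
  induction l with
  | nil => intro a; simp
  | cons c l' ih =>
    intro a
    rw [List.foldl_cons, ih, List.map_cons, List.sum_cons]
    omega

theorem pvFuel_eq {l1 l2 : List Char} (h : l1.Perm l2) (time : Int) :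
    pvFuelA l1 time = pvFuelA l2 time := by
  simp only [pvFuelA]
  rw [pvFuel_sum, pvFuel_sum,
    (h.map (fun c => 1 + (time + (c.toNat : Int) - 65).toNat)).sum_eq]

-- ===== VERDICT (by name: the statement is the Claim_ definition above) =====
theorem process_spec : Claim_equal_process := by
  intro steps workers time _hdom _hpre
  unfold Spec_process process process_alt
  rcases he : pvEdges? steps with _ | sps
  · rw [pvBuild_none he]
  · have hinit : pvMapsInv [] PySem.Dict.empty PySem.Dict.empty := by
      refine ⟨?_, ?_, ?_, ?_, ?_, ?_, ?_⟩ <;>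
        simp [PySem.Dict.getD_empty, PySem.Dict.keys_empty, PySem.Dict.contains_empty,
          pvPartsE, PySem.Set.empty]
    obtain ⟨pr0, su0, hbuild, hinv⟩ := pvBuild_some steps sps [] PySem.Dict.empty PySem.Dict.empty he hinit
    rw [List.nil_append] at hinv
    rw [hbuild]
    dsimp only
    obtain ⟨hprE, hprN, hsuE, hsuN, hkN, hkM, _⟩ := hinv
    have hkeysP : pr0.keys.Perm (pvPartsE sps) :=
      (List.perm_ext_iff_of_nodup hkN (pvNodupPartsE sps)).2 hkM
    have hsize : pr0.size = (pvPartsE sps).length := by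
      have h2 : pr0.keys.length = pr0.items.length := by
        rw [show pr0.keys = pr0.items.map (·.1) from rfl, List.length_map]
      have h1 : pr0.size = pr0.items.length := rfl
      rw [h1, ← h2, hkeysP.length_eq]
    have hfuel : pvFuelA (pvPartsE sps) time = pvFuelA pr0.keys time :=
      pvFuel_eq hkeysP.symm time
    -- the initial ready pool
    have hflt : ∀ x, x ∈ pr0.keys.filter (fun p => pr0.getD p PySem.Set.empty = [])
        ↔ pvReadyP sps [] x := by
      intro x
      rw [List.mem_filter]
      constructor
      · rintro ⟨hk, hg⟩
        have hg' : pr0.getD x PySem.Set.empty = [] := by simpa using hg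
        refine ⟨(hkM x).1 hk, by simp, fun e hes h2 => ?_⟩
        exfalso
        have : e.1 ∈ pr0.getD x PySem.Set.empty := (hprE x e.1).2 (by rw [← h2]; simpa using hes)
        rw [hg'] at this
        simp at this
      · rintro ⟨hxP, _, hall⟩
        refine ⟨(hkM x).2 hxP, ?_⟩
        have : pr0.getD x PySem.Set.empty = [] := by
          rw [List.eq_nil_iff_forall_not_mem]
          intro u hu
          have := hall (u, x) ((hprE x u).1 hu) rfl
          simp at this
        simpa using this
    have hfnd : (pr0.keys.filter (fun p => pr0.getD p PySem.Set.empty = [])).Nodup :=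
      hkN.filter _
    have hrm0 : ∀ x, x ∈ PySem.List.sorted
        (pr0.keys.filter (fun p => pr0.getD p PySem.Set.empty = [])) (fun x => x) false
        ↔ pvReadyP sps [] x ∧ x ∉ (([] : List (Char × Int)).map (·.1)) := by
      intro x
      rw [(PySem.List.sorted_perm _ _ _).mem_iff, hflt x]
      simp
    have hlt0 : (PySem.List.sorted
        (pr0.keys.filter (fun p => pr0.getD p PySem.Set.empty = [])) (fun x => x) false).Pairwise (· < ·) := by
      refine pvPairwise_lt_of_le_nodup ?_ ?_
      · exact PySem.List.sorted_pairwise _ _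
      · exact ((PySem.List.sorted_perm _ _ _).nodup_iff).2 hfnd
    have hinv0 : pvInv sps ([] : List (Char × Int)) (pvPartsE sps) []
        pr0 (PySem.List.sorted (pr0.keys.filter (fun p => pr0.getD p PySem.Set.empty = [])) (fun x => x) false) := by
      refine ⟨fun x => by simp, pvNodupPartsE sps, ?_, hprN, hlt0, hrm0, by simp, by simp, ?_⟩
      · intro d u
        rw [hprE d u]
        simp
      · intro e _ h2
        simp at h2
    have hbis := pvBisim sps su0 workers time hsuE hsuN (pvFuelA (pvPartsE sps) time)
      [] (pvPartsE sps) [] pr0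
      (PySem.List.sorted (pr0.keys.filter (fun p => pr0.getD p PySem.Set.empty = [])) (fun x => x) false)
      0 hinv0
    rw [show ((pr0.size : Int)) = (((pvPartsE sps).length : Int)) from by rw [hsize], ← hfuel]
    exact hbis
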